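/- GENERATED by c/gen_decode.py: decode facts of the image, one per distinct instruction byte string. -/
import UserX.DecodeImage

#decode_all Vorbis.Dec
  "01d2"  -- add edx,edx
  "0f8301fcffff"  -- jae 109d72
  "0f84c9000000"  -- je 11447e
  "0f85f4010000"  -- jne 1133be
  "0f8e75feffff"  -- jle 11104c
  "0fb64b0c"  -- movzx ecx,BYTE PTR [rbx+0xc]
  "29e9"  -- sub ecx,ebp
  "4088b70000c000"  -- mov BYTE PTR [rdi+0xc00000],sil
  "4129c8"  -- sub r8d,ecx
  "4183ed01"  -- sub r13d,0x1
  "4189ec"  -- mov r12d,ebp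
  "41bdffffffff"  -- mov r13d,0xffffffff
  "42837cb45000"  -- cmp DWORD PTR [rsp+r14*4+0x50],0x0
  "442ba398000000"  -- sub r12d,DWORD PTR [rbx+0x98]
  "44894c2404"  -- mov DWORD PTR [rsp+0x4],r9d
  "4489bd68ffffff"  -- mov DWORD PTR [rbp-0x98],r15d
  "448b742454"  -- mov r14d,DWORD PTR [rsp+0x54]
  "450fb66e1b"  -- movzx r13d,BYTE PTR [r14+0x1b]
  "4589c7"  -- mov r15d,r8d
  "46887c3321"  -- mov BYTE PTR [rbx+r14*1+0x21],r15b
  "48630424"  -- movsxd rax,DWORD PTR [rsp]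
  "4881c3e8030000"  -- add rbx,0x3e8
  "4883ed80"  -- sub rbp,0xffffffffffffff80
  "48898578ffffff"  -- mov QWORD PTR [rbp-0x88],rax
  "488b4c2440"  -- mov rcx,QWORD PTR [rsp+0x40]
  "488bb538080000"  -- mov rsi,QWORD PTR [rbp+0x838]
  "488d6a20"  -- lea rbp,[rdx+0x20]
  "488d7d60"  -- lea rdi,[rbp+0x60]
  "488dbba8000000"  -- lea rdi,[rbx+0xa8]
  "488dbdd4060000"  -- lea rdi,[rbp+0x6d4]
  "48c7442450b38ab541"  -- mov QWORD PTR [rsp+0x50],0x41b58ab3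
  "490fbff4"  -- movsx rsi,r12w
  "4989cd"  -- mov r13,rcx
  "498d7c2410"  -- lea rdi,[r12+0x10]
  "498dbda8000000"  -- lea rdi,[r13+0xa8]
  "4a8d7c2311"  -- lea rdi,[rbx+r12*1+0x11]
  "4c037d08"  -- add r15,QWORD PTR [rbp+0x8]
  "4c898d60ffffff"  -- mov QWORD PTR [rbp-0xa0],r9
  "4c8b7588"  -- mov r14,QWORD PTR [rbp-0x78]
  "4c8da540080000"  -- lea r12,[rbp+0x840]
  "4d89f4"  -- mov r12,r14
  "55"  -- push rbp
  "66410f6ecd"  -- movd xmm1,r13d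
  "66480f6ec3"  -- movq xmm0,rbx
  "7412"  -- je 112fb9
  "74ce"  -- je 10d7d8
  "767c"  -- jbe 101942
  "7d5e"  -- jge 10f30c
  "7f96"  -- jg 10765d
  "8344243001"  -- add DWORD PTR [rsp+0x30],0x1
  "84c2"  -- test dl,al
  "895db0"  -- mov DWORD PTR [rbp-0x50],ebx
  "89d8"  -- mov eax,ebx
  "8b4d00"  -- mov ecx,DWORD PTR [rbp+0x0]
  "8b8584000000"  -- mov eax,DWORD PTR [rbp+0x84]
  "a804"  -- test al,0x4
  "c1e310"  -- shl ebx,0x10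
  "c7801400c000f3f3f3f3"  -- mov DWORD PTR [rax+0xc00014],0xf3f3f3f3
  "d1fb"  -- sar ebx,1
  "e80873ffff"  -- call 100640
  "e81255ffff"  -- call 100800
  "e81bf5feff"  -- call 100480
  "e825effeff"  -- call 100640
  "e82eb6ffff"  -- call 100640
  "e838fbfeff"  -- call 100800
  "e844a1feff"  -- call 100300
  "e84df1feff"  -- call 1049e0
  "e85963ffff"  -- call 10b100
  "e867bdffff"  -- call 100300
  "e871f6ffff"  -- call 103f80
  "e87d18ffff"  -- call 100800
  "e88833ffff"  -- call 100640
  "e8929ffeff"  -- call 100640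
  "e89c10ffff"  -- call 104c60
  "e8a6d4ffff"  -- call 100720
  "e8b0fbfeff"  -- call 104100
  "e8bac7feff"  -- call 100800
  "e8c539ffff"  -- call 100300
  "e8cde1feff"  -- call 103d00
  "e8d968ffff"  -- call 100720
  "e8e29effff"  -- call 100640
  "e8ec12ffff"  -- call 100640
  "e8f569ffff"  -- call 100640
  "e901eaffff"  -- jmp 113b22
  "e943030000"  -- jmp 110fc2
  "e992feffff"  -- jmp 10d775
  "e9e8000000"  -- jmp 10e8e5
  "eb59"  -- jmp 103289
  "ebd6"  -- jmp 107184
  "f20f58056ddc0100"  -- addsd xmm0,QWORD PTR [rip+0x1dc6d]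
  "f20f5cda"  -- subsd xmm3,xmm2
  "f30f104c2410"  -- movss xmm1,DWORD PTR [rsp+0x10]
  "f30f107304"  -- movss xmm6,DWORD PTR [rbx+0x4]
  "f30f114dc0"  -- movss DWORD PTR [rbp-0x40],xmm1
  "f30f1173fc"  -- movss DWORD PTR [rbx-0x4],xmm6
  "f30f58c4"  -- addss xmm0,xmm4
  "f30f59ce"  -- mulss xmm1,xmm6
  "f30f5ec1"  -- divss xmm0,xmm1
  "f3410f117704"  -- movss DWORD PTR [r15+0x4],xmm6
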